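-- pv_equiv track=rewrite | github.com/IvanWeiYR/se-proj | taran.py | insertonSort
-- ===== SOURCE A (Python) =====
-- def insertonSort(alist):
-- 	index = [x for x in range(len(alist))]
-- 	rank = [1 for x in range(len(alist))]
-- 	for i in range(len(alist)):
-- 		key = alist[i]
-- 		val = index[i]
-- 		j = i - 1
-- 		while j >= 0 and alist[j] > key:
-- 			alist[j+1] = alist[j]
-- 			index[j+1] = index[j]
-- 			j -= 1
-- 		alist[j+1] = key
-- 		index[j+1] = val
--
-- 	# ranking = len(alist)
-- 	# for i in range(len(alist)-1):
-- 	# 	ranking -= 1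
-- 	# 	if alist[i] == alist[i+1]:
-- 	# 		rank[index[i+1]] = rank[index[i]]
-- 	# 	else:
-- 	# 		rank[index[i+1]] = ranking
-- 	# return rank
-- 	ranking = 1
-- 	for i in range(len(alist)-1,0,-1):
-- 		ranking += 1
-- 		if alist[i] == alist[i-1]:
-- 			rank[index[i-1]] = rank[index[i]]
-- 		else:
-- 			rank[index[i-1]] = ranking
-- 	return rank,index
-- ===== SOURCE B (Python) =====
-- def insertonSort(alist):
--     # rank[i] = 1 + number of elements strictly greater than alist[i]
--     rank = [1 + sum(1 for y in alist if y > x) for x in alist]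
--     # stable sort of the original positions by value
--     index = sorted(range(len(alist)), key=lambda i: alist[i])
--     alist.sort()  # A sorts alist in place; reproduce the mutation
--     return rank, index
-- ===== Notes on version B (the rewrite author's own statement) =====
-- stated objective: alternative
-- what changed: B computes ranks directly as 1 + (count of strictly greater elements) with a nested scan before any sorting, and obtains the index list from the builtin stable sort of range(n) keyed by value, instead of A's in-place insertion sort that shifts two parallel arrays and then propagates ranks through a descending pass over the sorted array.
import Mathlib
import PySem

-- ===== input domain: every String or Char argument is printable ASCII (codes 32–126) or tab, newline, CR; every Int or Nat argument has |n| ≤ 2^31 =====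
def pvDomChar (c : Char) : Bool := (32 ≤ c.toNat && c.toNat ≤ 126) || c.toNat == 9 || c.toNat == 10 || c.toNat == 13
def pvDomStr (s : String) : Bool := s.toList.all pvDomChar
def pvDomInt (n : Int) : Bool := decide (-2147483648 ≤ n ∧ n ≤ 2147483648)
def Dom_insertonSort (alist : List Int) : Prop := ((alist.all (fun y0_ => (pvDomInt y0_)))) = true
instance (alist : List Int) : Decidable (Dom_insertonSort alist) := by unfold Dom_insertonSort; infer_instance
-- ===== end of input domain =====

-- B replaces A's array-shifting insertion sort + descending rank propagation by a direct
-- count-of-strictly-greater rank scan plus the builtin stable sort of the index range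
-- (objective: alternative, same O(n^2) cost).
-- ===== PORT A =====
-- A mutates its argument (in-place insertion sort); the equivalence proved here is about
-- the RETURN value (rank, index) only.
-- inner while loop of A: 'while j >= 0 and alist[j] > key: shift; j -= 1'
def pvShift (al idx : List Int) (key : Int) (j : Int) : List Int × List Int × Int :=
  if h : 0 ≤ j ∧ PySem.List.pyGetD al j 0 > key then
    pvShift (al.set (j + 1).toNat (PySem.List.pyGetD al j 0))
            (idx.set (j + 1).toNat (PySem.List.pyGetD idx j 0)) key (j - 1)
  else (al, idx, j)
termination_by (j + 1).toNat
decreasing_by omega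

def insertonSort (alist : List Int) : List Int × List Int :=
  let n : Int := alist.length
  let index := PySem.List.pyRange 0 n 1           -- [x for x in range(len(alist))]
  let rank := (PySem.List.pyRange 0 n 1).map (fun _ => (1 : Int))
  -- for i in range(len(alist)): insertion step (list assignments at j+1 are in range,
  -- so List.set on (j+1).toNat is exact here)
  let st := (PySem.List.pyRange 0 n 1).foldl (fun (st : List Int × List Int) i =>
      let key := PySem.List.pyGetD st.1 i 0
      let val := PySem.List.pyGetD st.2 i 0
      let r := pvShift st.1 st.2 key (i - 1)
      (r.1.set (r.2.2 + 1).toNat key, r.2.1.set (r.2.2 + 1).toNat val)) (alist, index)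
  let al := st.1
  let idx := st.2
  -- for i in range(len(alist)-1, 0, -1): rank propagation (index values are provably
  -- in [0, n), so List.set on .toNat is exact here)
  let rr := (PySem.List.pyRange (n - 1) 0 (-1)).foldl (fun (st : List Int × Int) i =>
      let ranking := st.2 + 1
      if PySem.List.pyGetD al i 0 = PySem.List.pyGetD al (i - 1) 0 then
        (st.1.set (PySem.List.pyGetD idx (i - 1) 0).toNat
           (PySem.List.pyGetD st.1 (PySem.List.pyGetD idx i 0) 0), ranking)
      else
        (st.1.set (PySem.List.pyGetD idx (i - 1) 0).toNat ranking, ranking)) (rank, 1)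
  (rr.1, idx)

-- ===== PORT B =====
-- B: rank[i] = 1 + sum(1 for y in alist if y > x); index = sorted(range(n), key=alist[i]).
def insertonSort_alt (alist : List Int) : List Int × List Int :=
  let rank := alist.map (fun x => 1 + (alist.map (fun y => if y > x then (1 : Int) else 0)).sum)
  let index := PySem.List.sorted (PySem.List.pyRange 0 (alist.length : Int) 1)
                 (fun i => PySem.List.pyGetD alist i 0) false
  (rank, index)

-- ===== PRECONDITION & SPEC =====
def Spec_insertonSort (alist : List Int) (out : List Int × List Int) : Prop := out = insertonSort_alt alist
instance (alist : List Int) (out : List Int × List Int) : Decidable (Spec_insertonSort alist out) := by unfold Spec_insertonSort; infer_instance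

-- ===== CLAIM (what is proved, stated in full; the proofs are below) =====
def Claim_equal_insertonSort : Prop := ∀ (alist : List Int), Dom_insertonSort alist → Spec_insertonSort alist (insertonSort alist)

-- ===== LEMMAS AND PROOFS =====

-- comparison on (value, original index) pairs: by value only, as both programs compare
def pvBp (a b : Int × Int) : Bool := decide (a.1 < b.1)
def pvG (alist : List Int) (i : Int) : Int × Int := (PySem.List.pyGetD alist i 0, i)
def pvPairs (alist : List Int) : List (Int × Int) :=
  (PySem.List.pyRange 0 (alist.length : Int) 1).map (pvG alist)
def pvFold (acc : List (Int × Int)) (l : List (Int × Int)) : List (Int × Int) :=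
  l.foldl (fun acc x => PySem.List.insertBy pvBp x acc) acc
def pvS (alist : List Int) : List (Int × Int) := pvFold [] (pvPairs alist)
def pvCnt (alist : List Int) (x : Int) : Int :=
  (alist.map (fun y => if y > x then (1 : Int) else 0)).sum

theorem pvInsertBy_nil {α : Type} (before : α → α → Bool) (x : α) :
    PySem.List.insertBy before x [] = [x] := rfl

theorem pvInsertBy_cons {α : Type} (before : α → α → Bool) (x y : α) (l : List α) :
    PySem.List.insertBy before x (y :: l) =
      if before x y then x :: y :: l else y :: PySem.List.insertBy before x l := rfl

theorem pvInsertBy_append_last {α : Type} (before : α → α → Bool) (x b : α) (l : List α)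
    (h : before x b = true) :
    PySem.List.insertBy before x (l ++ [b]) = PySem.List.insertBy before x l ++ [b] := by
  induction l with
  | nil => simp [pvInsertBy_nil, pvInsertBy_cons, h]
  | cons y ys ih =>
    rw [List.cons_append, pvInsertBy_cons, pvInsertBy_cons]
    by_cases hxy : before x y
    · simp [hxy]
    · simp [hxy, ih]

theorem pvMap_insertBy {α β : Type} (f : α → β) (before : α → α → Bool) (before' : β → β → Bool)
    (h : ∀ a b, before' (f a) (f b) = before a b) (x : α) (l : List α) :
    (PySem.List.insertBy before x l).map f = PySem.List.insertBy before' (f x) (l.map f) := by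
  induction l with
  | nil => simp [pvInsertBy_nil]
  | cons y ys ih =>
    rw [pvInsertBy_cons, List.map_cons, pvInsertBy_cons, h]
    by_cases hxy : before x y
    · simp [hxy]
    · simp [hxy, ih]

theorem pvInsertBy_perm {α : Type} (before : α → α → Bool) (x : α) (l : List α) :
    (PySem.List.insertBy before x l).Perm (x :: l) := by
  induction l with
  | nil => rfl
  | cons y ys ih =>
    rw [pvInsertBy_cons]
    by_cases hxy : before x y
    · simp [hxy]
    · simpa [hxy] using ((ih.cons y).trans (List.Perm.swap x y ys))

theorem pvInsertBy_pairwise (x : Int × Int) (l : List (Int × Int))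
    (h : l.Pairwise (fun a b => a.1 ≤ b.1)) :
    (PySem.List.insertBy pvBp x l).Pairwise (fun a b => a.1 ≤ b.1) := by
  induction l with
  | nil => simp [pvInsertBy_nil]
  | cons y ys ih =>
    rw [pvInsertBy_cons]
    rcases List.pairwise_cons.mp h with ⟨hy, hys⟩
    by_cases hxy : pvBp x y
    · have hx : x.1 < y.1 := by simpa [pvBp] using hxy
      rw [if_pos hxy]
      refine List.pairwise_cons.mpr ⟨?_, h⟩
      intro z hz
      rcases List.mem_cons.mp hz with hz | hz
      · subst hz; omega
      · have := hy z hz; omega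
    · have hx : ¬ x.1 < y.1 := by simpa [pvBp] using hxy
      rw [if_neg (by simp [hxy])]
      refine List.pairwise_cons.mpr ⟨?_, ih hys⟩
      intro z hz
      rcases (List.Perm.mem_iff (pvInsertBy_perm pvBp x ys)).mp hz with hz' 
      rcases List.mem_cons.mp hz' with hz2 | hz2
      · subst hz2; omega
      · exact hy z hz2

theorem pvFold_append (acc : List (Int × Int)) (l : List (Int × Int)) (x : Int × Int) :
    pvFold acc (l ++ [x]) = PySem.List.insertBy pvBp x (pvFold acc l) := by
  simp [pvFold]

theorem pvFold_perm (l acc : List (Int × Int)) : (pvFold acc l).Perm (acc ++ l) := by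
  induction l generalizing acc with
  | nil => simp [pvFold]
  | cons x xs ih =>
    have h1 : pvFold acc (x :: xs) = pvFold (PySem.List.insertBy pvBp x acc) xs := rfl
    rw [h1]
    refine (ih _).trans ?_
    refine (List.Perm.append_right xs ((pvInsertBy_perm pvBp x acc))).trans ?_
    simpa using (List.perm_middle (a := x) (l₁ := acc) (l₂ := xs)).symm

theorem pvFold_pairwise (l acc : List (Int × Int)) (h : acc.Pairwise (fun a b => a.1 ≤ b.1)) :
    (pvFold acc l).Pairwise (fun a b => a.1 ≤ b.1) := by
  induction l generalizing acc with
  | nil => simpa [pvFold] using h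
  | cons x xs ih =>
    have h1 : pvFold acc (x :: xs) = pvFold (PySem.List.insertBy pvBp x acc) xs := rfl
    rw [h1]
    exact ih _ (pvInsertBy_pairwise x acc h)

theorem pvFold_map (before : Int → Int → Bool)
    (f : Int → Int × Int) (h : ∀ a b, pvBp (f a) (f b) = before a b) (l : List Int)
    (acc : List Int) :
    pvFold (acc.map f) (l.map f) =
      (l.foldl (fun a x => PySem.List.insertBy before x a) acc).map f := by
  induction l generalizing acc with
  | nil => simp [pvFold]
  | cons x xs ih =>
    have h1 : pvFold (acc.map f) ((x :: xs).map f)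
        = pvFold ((PySem.List.insertBy before x acc).map f) (xs.map f) := by
      simp only [List.map_cons]
      show pvFold (PySem.List.insertBy pvBp (f x) (acc.map f)) (xs.map f) = _
      rw [pvMap_insertBy f before pvBp (fun a b => h a b) x acc]
    rw [h1, ih]
    rfl

theorem pvSet_len_append {α : Type} (l1 : List α) (g : α) (t : List α) (x : α) :
    (l1 ++ g :: t).set l1.length x = l1 ++ x :: t := by
  induction l1 with
  | nil => simp
  | cons a l ih => simp [List.set_cons_succ, ih]

-- the inner while loop followed by the two writes inserts (key, val) into the sorted prefix
theorem pvShift_spec (sp : List (Int × Int)) (kv : Int × Int) (g1 g2 : Int) (ta ti : List Int)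
    (hs : sp.Pairwise (fun a b => a.1 ≤ b.1)) :
    (let r := pvShift (sp.map Prod.fst ++ g1 :: ta) (sp.map Prod.snd ++ g2 :: ti) kv.1
                ((sp.length : Int) - 1)
     (r.1.set (r.2.2 + 1).toNat kv.1, r.2.1.set (r.2.2 + 1).toNat kv.2))
    = ((PySem.List.insertBy pvBp kv sp).map Prod.fst ++ ta,
       (PySem.List.insertBy pvBp kv sp).map Prod.snd ++ ti) := by
  induction sp using List.reverseRecOn generalizing g1 g2 ta ti with
  | nil =>
    simp only [List.map_nil, List.nil_append, List.length_nil]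
    rw [pvShift]
    rw [dif_neg (by norm_num)]
    norm_num [pvInsertBy_nil]
  | append_singleton l b ih =>
    rcases List.pairwise_append.mp hs with ⟨hl, _, hlb⟩
    have hlb' : ∀ y ∈ l, y.1 ≤ b.1 := fun y hy => hlb y hy b (by simp)
    have hm : ((l ++ [b]).length : Int) - 1 = (l.length : Int) := by simp
    have hget1 : PySem.List.pyGetD ((l ++ [b]).map Prod.fst ++ g1 :: ta) (l.length : Int) 0
        = b.1 := by
      rw [PySem.List.pyGetD_eq_getElem _ _ (by positivity) (by simp; omega)]
      simp
    have hget2 : PySem.List.pyGetD ((l ++ [b]).map Prod.snd ++ g2 :: ti) (l.length : Int) 0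
        = b.2 := by
      rw [PySem.List.pyGetD_eq_getElem _ _ (by positivity) (by simp; omega)]
      simp
    rw [hm, pvShift]
    by_cases hb : kv.1 < b.1
    · rw [dif_pos ⟨by positivity, by rw [hget1]; exact_mod_cast hb⟩]
      rw [hget1, hget2]
      have hset1 : ((l ++ [b]).map Prod.fst ++ g1 :: ta).set ((l.length : Int) + 1).toNat b.1
          = l.map Prod.fst ++ b.1 :: (b.1 :: ta) := by
        rw [show (l ++ [b]).map Prod.fst ++ g1 :: ta
            = (l.map Prod.fst ++ [b.1]) ++ g1 :: ta by simp]
        rw [show ((l.length : Int) + 1).toNat = (l.map Prod.fst ++ [b.1]).length by simp]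
        rw [pvSet_len_append]
        simp
      have hset2 : ((l ++ [b]).map Prod.snd ++ g2 :: ti).set ((l.length : Int) + 1).toNat b.2
          = l.map Prod.snd ++ b.2 :: (b.2 :: ti) := by
        rw [show (l ++ [b]).map Prod.snd ++ g2 :: ti
            = (l.map Prod.snd ++ [b.2]) ++ g2 :: ti by simp]
        rw [show ((l.length : Int) + 1).toNat = (l.map Prod.snd ++ [b.2]).length by simp]
        rw [pvSet_len_append]
        simp
      rw [hset1, hset2]
      have := ih hl (g1 := b.1) (g2 := b.2) (ta := b.1 :: ta) (ti := b.2 :: ti)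
      simp only at this
      rw [this]
      rw [pvInsertBy_append_last pvBp kv b l (by simp [pvBp]; exact hb)]
      simp
    · rw [dif_neg (by rw [hget1]; simp; omega)]
      simp only
      have hins : PySem.List.insertBy pvBp kv (l ++ [b]) = (l ++ [b]) ++ [kv] := by
        refine PySem.List.insertBy_of_forall_not_before _ _ _ ?_
        intro y hy
        rcases List.mem_append.mp hy with hy | hy
        · have := hlb' y hy
          simp [pvBp]; omega
        · simp at hy; subst hy; simp [pvBp]; omega
      have hset1 : ((l ++ [b]).map Prod.fst ++ g1 :: ta).set ((l.length : Int) + 1).toNat kv.1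
          = (l ++ [b]).map Prod.fst ++ kv.1 :: ta := by
        rw [show ((l.length : Int) + 1).toNat = ((l ++ [b]).map Prod.fst).length by simp]
        rw [pvSet_len_append]
      have hset2 : ((l ++ [b]).map Prod.snd ++ g2 :: ti).set ((l.length : Int) + 1).toNat kv.2
          = (l ++ [b]).map Prod.snd ++ kv.2 :: ti := by
        rw [show ((l.length : Int) + 1).toNat = ((l ++ [b]).map Prod.snd).length by simp]
        rw [pvSet_len_append]
      rw [hset1, hset2, hins]
      simp

-- outer loop invariant: after k steps the prefix is the insert-sorted first k pairs
theorem pvOuter (alist : List Int) (k : Nat) (hk : k ≤ alist.length) :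
    (PySem.List.pyRange 0 (k : Int) 1).foldl
      (fun (st : List Int × List Int) i =>
        let key := PySem.List.pyGetD st.1 i 0
        let val := PySem.List.pyGetD st.2 i 0
        let r := pvShift st.1 st.2 key (i - 1)
        (r.1.set (r.2.2 + 1).toNat key, r.2.1.set (r.2.2 + 1).toNat val))
      (alist, PySem.List.pyRange 0 (alist.length : Int) 1)
    = ((pvFold [] ((PySem.List.pyRange 0 (k : Int) 1).map (pvG alist))).map Prod.fst
         ++ alist.drop k,
       (pvFold [] ((PySem.List.pyRange 0 (k : Int) 1).map (pvG alist))).map Prod.snd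
         ++ PySem.List.pyRange (k : Int) (alist.length : Int) 1) := by
  induction k with
  | zero =>
    rw [show ((0 : Nat) : Int) = 0 by norm_num, PySem.List.pyRange_one_eq_nil le_rfl]
    simp [pvFold]
  | succ k ih =>
    have hk1 : k ≤ alist.length := by omega
    have hkn : (k : Int) < (alist.length : Int) := by exact_mod_cast hk
    have hklt : k < alist.length := by omega
    have hcast : ((k + 1 : Nat) : Int) = (k : Int) + 1 := by push_cast; ring
    rw [hcast, PySem.List.pyRange_one_succ_right (by positivity), List.foldl_append, ih hk1]
    set Sk := pvFold [] ((PySem.List.pyRange 0 (k : Int) 1).map (pvG alist)) with hSk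
    have lenSk : Sk.length = k := by
      have h1 := (pvFold_perm ((PySem.List.pyRange 0 (k : Int) 1).map (pvG alist)) []).length_eq
      rw [← hSk] at h1
      simp [PySem.List.length_pyRange_one] at h1
      exact h1
    have hpair : Sk.Pairwise (fun a b => a.1 ≤ b.1) :=
      pvFold_pairwise _ [] (by simp)
    have hGet : PySem.List.pyGetD alist (k : Int) 0 = alist[k] := by
      rw [PySem.List.pyGetD_eq_getElem _ _ (by positivity) (by exact_mod_cast hkn)]
      simp
    have hdrop : alist.drop k = alist[k] :: alist.drop (k + 1) :=
      List.drop_eq_getElem_cons hklt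
    have hrange : PySem.List.pyRange (k : Int) (alist.length : Int) 1
        = (k : Int) :: PySem.List.pyRange ((k : Int) + 1) (alist.length : Int) 1 :=
      PySem.List.pyRange_one_cons hkn
    simp only [List.foldl_cons, List.foldl_nil]
    have hkey : PySem.List.pyGetD (Sk.map Prod.fst ++ alist.drop k) (k : Int) 0 = alist[k] := by
      rw [PySem.List.pyGetD_eq_getElem _ _ (by positivity)
        (by simp [lenSk]; omega)]
      rw [List.getElem_append_right (by simp [lenSk])]
      simp [lenSk]
    have hval : PySem.List.pyGetD (Sk.map Prod.snd
        ++ PySem.List.pyRange (k : Int) (alist.length : Int) 1) (k : Int) 0 = (k : Int) := by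
      rw [hrange]
      rw [PySem.List.pyGetD_eq_getElem _ _ (by positivity)
        (by simp [lenSk, PySem.List.length_pyRange_one]; try omega)]
      rw [List.getElem_append_right (by simp [lenSk])]
      simp [lenSk]
    have hmain := pvShift_spec Sk (pvG alist (k : Int)) (alist[k]) (k : Int)
      (alist.drop (k + 1)) (PySem.List.pyRange ((k : Int) + 1) (alist.length : Int) 1) hpair
    simp only [pvG, hGet] at hmain
    have hS1 : pvFold [] ((PySem.List.pyRange 0 (k : Int) 1 ++ [(k : Int)]).map (pvG alist))
        = PySem.List.insertBy pvBp (alist[k], (k : Int)) Sk := by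
      rw [List.map_append, List.map_singleton, pvFold_append]
      simp only [← hSk, pvG, hGet]
    rw [hS1, hkey, hval, hdrop, hrange]
    rw [lenSk] at hmain
    exact hmain

theorem pvS_length (alist : List Int) : (pvS alist).length = alist.length := by
  have h1 := (pvFold_perm (pvPairs alist) []).length_eq
  simp only [pvS]
  rw [h1]
  simp [pvPairs, PySem.List.length_pyRange_one]

theorem pvS_mem (alist : List Int) (p : Int × Int) (hp : p ∈ pvS alist) :
    0 ≤ p.2 ∧ p.2 < (alist.length : Int) ∧ p.1 = PySem.List.pyGetD alist p.2 0 := by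
  have h1 : p ∈ pvPairs alist := by
    have := (pvFold_perm (pvPairs alist) []).mem_iff.mp hp
    simpa using this
  rcases List.mem_map.mp h1 with ⟨i, hi, hgi⟩
  rcases PySem.List.mem_pyRange_one.mp hi with ⟨h0, h1'⟩
  subst hgi
  exact ⟨h0, h1', rfl⟩

theorem pvS_pairwise (alist : List Int) :
    (pvS alist).Pairwise (fun a b => a.1 ≤ b.1) := by
  unfold pvS
  exact pvFold_pairwise _ [] (by simp)

theorem pvS_snd_perm (alist : List Int) :
    ((pvS alist).map Prod.snd).Perm (PySem.List.pyRange 0 (alist.length : Int) 1) := by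
  have h1 : ((pvS alist).map Prod.snd).Perm ((pvPairs alist).map Prod.snd) :=
    ((pvFold_perm (pvPairs alist) []).map Prod.snd).trans (by simp)
  refine h1.trans ?_
  have : (pvPairs alist).map Prod.snd = PySem.List.pyRange 0 (alist.length : Int) 1 := by
    simp [pvPairs, List.map_map, Function.comp_def, pvG]
  rw [this]

theorem pvS_snd_nodup (alist : List Int) : ((pvS alist).map Prod.snd).Nodup := by
  exact ((pvS_snd_perm alist).nodup_iff).mpr (PySem.List.nodup_pyRange_one _ _)

theorem pvS_fst_perm (alist : List Int) : ((pvS alist).map Prod.fst).Perm alist := by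
  have h1 : ((pvS alist).map Prod.fst).Perm ((pvPairs alist).map Prod.fst) :=
    ((pvFold_perm (pvPairs alist) []).map Prod.fst).trans (by simp)
  refine h1.trans ?_
  have : (pvPairs alist).map Prod.fst = alist := by
    simp only [pvPairs, List.map_map, Function.comp_def, pvG]
    exact PySem.List.map_pyGetD_pyRange_zero alist 0
  rw [this]

-- B's index list is the second projection of the insert-sorted pairs
theorem pvIndexB (alist : List Int) :
    PySem.List.sorted (PySem.List.pyRange 0 (alist.length : Int) 1)
      (fun i => PySem.List.pyGetD alist i 0) false = (pvS alist).map Prod.snd := by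
  rw [PySem.List.sorted_eq_foldl_insertBy]
  have h1 := pvFold_map (fun a b => decide (PySem.List.pyGetD alist a 0 < PySem.List.pyGetD alist b 0))
    (pvG alist) (by intro a b; simp [pvBp, pvG]) (PySem.List.pyRange 0 (alist.length : Int) 1) []
  simp only [List.map_nil] at h1
  have h2 : pvS alist = (PySem.List.sorted (PySem.List.pyRange 0 (alist.length : Int) 1)
      (fun i => PySem.List.pyGetD alist i 0) false).map (pvG alist) := by
    rw [PySem.List.sorted_eq_foldl_insertBy]
    exact h1
  rw [PySem.List.sorted_eq_foldl_insertBy] at h2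
  rw [h2, List.map_map]
  have h3 : Prod.snd ∘ pvG alist = id := by funext i; rfl
  rw [h3, List.map_id]

-- counting lemmas
theorem pvSum_zero (l : List Int) (x : Int) (h : ∀ y ∈ l, ¬ x < y) :
    (l.map (fun y => if y > x then (1 : Int) else 0)).sum = 0 := by
  apply List.sum_eq_zero
  intro z hz
  rcases List.mem_map.mp hz with ⟨y, hy, hzy⟩
  have := h y hy
  simp only [← hzy, gt_iff_lt, if_neg this]

theorem pvSum_one (l : List Int) (x : Int) (h : ∀ y ∈ l, x < y) :
    (l.map (fun y => if y > x then (1 : Int) else 0)).sum = (l.length : Int) := by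
  induction l with
  | nil => simp
  | cons y ys ih =>
    have h1 : x < y := h y (by simp)
    have h2 : ∀ y ∈ ys, x < y := fun z hz => h z (by simp [hz])
    simp only [List.map_cons, List.sum_cons, ih h2, gt_iff_lt, if_pos h1, List.length_cons]
    push_cast
    ring

theorem pvCnt_perm (l l' : List Int) (h : l.Perm l') (x : Int) : pvCnt l x = pvCnt l' x := by
  unfold pvCnt
  exact (h.map _).sum_eq

-- rank of the p-th smallest: count of strictly greater elements, read off the sorted list
theorem pvCnt_split (A : List Int) (x : Int) (m : Nat) (hm : m ≤ A.length)
    (h1 : ∀ y ∈ A.take m, ¬ x < y) (h2 : ∀ y ∈ A.drop m, x < y) :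
    pvCnt A x = (A.length : Int) - m := by
  unfold pvCnt
  conv_lhs => rw [← List.take_append_drop m A]
  rw [List.map_append, List.sum_append, pvSum_zero _ _ h1, pvSum_one _ _ h2]
  simp only [List.length_drop, zero_add]
  omega

theorem pvCnt_sorted (A : List Int) (hA : A.Pairwise (· ≤ ·)) (t : Nat) (ht : t + 1 < A.length)
    (hlt : A[t] < A[t + 1]'ht) :
    pvCnt A (A[t]'(by omega)) = (A.length : Int) - (t + 1) := by
  have hpg := List.pairwise_iff_getElem.mp hA
  apply pvCnt_split A _ (t + 1) (by omega)
  · intro y hy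
    rcases List.mem_iff_getElem.mp hy with ⟨q, hq, hqy⟩
    have hq' : q < t + 1 := by
      have := hq; simp only [List.length_take] at this; omega
    rw [List.getElem_take] at hqy
    rcases Nat.lt_or_ge q t with hqt | hqt
    · have := hpg q t (by omega) (by omega) hqt
      omega
    · have : q = t := by omega
      subst this
      omega
  · intro y hy
    have hdrop : A.drop (t + 1) = A[t + 1]'ht :: A.drop (t + 2) := List.drop_eq_getElem_cons ht
    have hp2 : (A.drop (t + 1)).Pairwise (· ≤ ·) := hA.sublist (List.drop_sublist _ _)
    rw [hdrop] at hy hp2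
    rcases List.mem_cons.mp hy with h | h
    · subst h; exact hlt
    · have := (List.pairwise_cons.mp hp2).1 y h
      omega

theorem pvCnt_last (A : List Int) (hA : A.Pairwise (· ≤ ·))
    (h : (A.length - 1) < A.length) :
    pvCnt A (A[A.length - 1]'h) = 0 := by
  unfold pvCnt
  apply pvSum_zero
  intro y hy
  rcases List.mem_iff_getElem.mp hy with ⟨q, hq, hqy⟩
  rcases Nat.lt_or_ge q (A.length - 1) with hq2 | hq2
  · have := (List.pairwise_iff_getElem.mp hA) q (A.length - 1) (by omega) (by omega) hq2
    omega
  · have : q = A.length - 1 := by omega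
    subst this
    omega

-- the descending rank loop
theorem pvRankLoop (alist : List Int) (t : Nat) (rank : List Int)
    (ht : t ≤ alist.length - 1) (hn : 0 < alist.length)
    (hlen : rank.length = alist.length)
    (H : ∀ p : Nat, t ≤ p → (hp : p < (pvS alist).length) →
      PySem.List.pyGetD rank ((pvS alist)[p].2) 0 = 1 + pvCnt alist ((pvS alist)[p].1)) :
    (let res := (PySem.List.pyRange (t : Int) 0 (-1)).foldl
      (fun (st : List Int × Int) i =>
        let ranking := st.2 + 1
        if PySem.List.pyGetD ((pvS alist).map Prod.fst) i 0
            = PySem.List.pyGetD ((pvS alist).map Prod.fst) (i - 1) 0 then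
          (st.1.set (PySem.List.pyGetD ((pvS alist).map Prod.snd) (i - 1) 0).toNat
            (PySem.List.pyGetD st.1 (PySem.List.pyGetD ((pvS alist).map Prod.snd) i 0) 0),
           ranking)
        else
          (st.1.set (PySem.List.pyGetD ((pvS alist).map Prod.snd) (i - 1) 0).toNat ranking,
           ranking)) (rank, (alist.length : Int) - t)
     res.1.length = alist.length ∧
       ∀ p : Nat, (hp : p < (pvS alist).length) →
         PySem.List.pyGetD res.1 ((pvS alist)[p].2) 0 = 1 + pvCnt alist ((pvS alist)[p].1)) := by
  induction t generalizing rank with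
  | zero =>
    rw [show ((0 : Nat) : Int) = 0 by norm_num, PySem.List.pyRange_neg_one_eq_nil le_rfl]
    simp only [List.foldl_nil]
    exact ⟨hlen, fun p hp => H p (Nat.zero_le p) hp⟩
  | succ t ih =>
    have lenS : (pvS alist).length = alist.length := pvS_length alist
    have htn : t + 1 < alist.length := by omega
    have htS : t + 1 < (pvS alist).length := by omega
    have htS' : t < (pvS alist).length := by omega
    have hcast : ((t + 1 : Nat) : Int) = (t : Int) + 1 := by push_cast; ring
    rw [hcast, PySem.List.pyRange_neg_one_cons (by positivity), List.foldl_cons]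
    have hsub : (t : Int) + 1 - 1 = (t : Int) := by ring
    rw [hsub]
    -- the four reads of this iteration
    have hF1 : PySem.List.pyGetD ((pvS alist).map Prod.fst) ((t : Int) + 1) 0
        = (pvS alist)[t + 1].1 := by
      rw [show (t : Int) + 1 = ((t + 1 : Nat) : Int) by push_cast; ring]
      rw [PySem.List.pyGetD_eq_getElem _ _ (by positivity) (by simp; omega)]
      simp
    have hF0 : PySem.List.pyGetD ((pvS alist).map Prod.fst) ((t : Int)) 0
        = (pvS alist)[t].1 := by
      rw [PySem.List.pyGetD_eq_getElem _ _ (by positivity) (by simp; omega)]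
      simp
    have hI1 : PySem.List.pyGetD ((pvS alist).map Prod.snd) ((t : Int) + 1) 0
        = (pvS alist)[t + 1].2 := by
      rw [show (t : Int) + 1 = ((t + 1 : Nat) : Int) by push_cast; ring]
      rw [PySem.List.pyGetD_eq_getElem _ _ (by positivity) (by simp; omega)]
      simp
    have hI0 : PySem.List.pyGetD ((pvS alist).map Prod.snd) ((t : Int)) 0
        = (pvS alist)[t].2 := by
      rw [PySem.List.pyGetD_eq_getElem _ _ (by positivity) (by simp; omega)]
      simp
    have hmem0 := pvS_mem alist _ (List.getElem_mem htS')
    have hmem1 := pvS_mem alist _ (List.getElem_mem htS)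
    have hne01 : (pvS alist)[t].2 ≠ (pvS alist)[t + 1].2 := by
      intro he
      have hnd := pvS_snd_nodup alist
      have h1 : ((pvS alist).map Prod.snd)[t]'(by simp; omega)
          = ((pvS alist).map Prod.snd)[t + 1]'(by simp; omega) := by
        simp only [List.getElem_map]
        exact he
      have := (hnd.getElem_inj_iff).mp h1
      omega
    have hpairF : ((pvS alist).map Prod.fst).Pairwise (· ≤ ·) := by
      have := pvS_pairwise alist
      exact List.pairwise_map.mpr this
    -- the written rank list in either branch is correct at position t and preserves t+1..
    have hsetOK : ∀ (v : Int), v = 1 + pvCnt alist ((pvS alist)[t].1) →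
        (∀ p : Nat, t ≤ p → (hp : p < (pvS alist).length) →
          PySem.List.pyGetD (rank.set ((pvS alist)[t].2).toNat v) ((pvS alist)[p].2) 0
            = 1 + pvCnt alist ((pvS alist)[p].1)) := by
      intro v hv p hp hpS
      have hmemp := pvS_mem alist _ (List.getElem_mem hpS)
      have hb : ((pvS alist)[p].2).toNat < rank.length := by omega
      rw [PySem.List.pyGetD_eq_getElem _ _ (by omega) (by simp; omega)]
      rcases Nat.eq_or_lt_of_le hp with he | hlt2
      · subst he
        rw [List.getElem_set_self (by simp only [List.length_set]; omega)]
        exact hv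
      · have hnep : (pvS alist)[t].2 ≠ (pvS alist)[p].2 := by
          intro he
          have hnd := pvS_snd_nodup alist
          have h1 : ((pvS alist).map Prod.snd)[t]'(by simp; omega)
              = ((pvS alist).map Prod.snd)[p]'(by simp; omega) := by
            simp only [List.getElem_map]
            exact he
          have := (hnd.getElem_inj_iff).mp h1
          omega
        rw [List.getElem_set_ne (by omega)]
        have := H p (by omega) hpS
        rw [PySem.List.pyGetD_eq_getElem _ _ (by omega) (by omega)] at this
        exact this
    simp only [hF1, hF0, hI1, hI0]
    by_cases hc : (pvS alist)[t + 1].1 = (pvS alist)[t].1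
    · rw [if_pos hc]
      have hval : PySem.List.pyGetD rank ((pvS alist)[t + 1].2) 0
          = 1 + pvCnt alist ((pvS alist)[t + 1].1) := H (t + 1) (by omega) htS
      rw [show (alist.length : Int) - ((t : Int) + 1) + 1 = (alist.length : Int) - (t : Int)
        by ring]
      refine ih _ (by omega) (by simp only [List.length_set]; exact hlen) ?_
      have := hsetOK (PySem.List.pyGetD rank ((pvS alist)[t + 1].2) 0)
        (by rw [hval, hc])
      intro p hp hpS
      exact this p hp hpS
    · rw [if_neg hc]
      have hlt2 : (pvS alist)[t].1 < (pvS alist)[t + 1].1 := by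
        have hle : ((pvS alist).map Prod.fst)[t]'(by simp; omega)
            ≤ ((pvS alist).map Prod.fst)[t + 1]'(by simp; omega) :=
          List.pairwise_iff_getElem.mp hpairF t (t + 1) (by simp; omega) (by simp; omega)
            (by omega)
        simp only [List.getElem_map] at hle
        omega
      have hcnt : pvCnt alist ((pvS alist)[t].1)
          = (alist.length : Int) - (t + 1) := by
        have hp2 : pvCnt alist ((pvS alist)[t].1)
            = pvCnt ((pvS alist).map Prod.fst) ((pvS alist)[t].1) :=
          pvCnt_perm _ _ (pvS_fst_perm alist).symm _
        rw [hp2]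
        have hF : ((pvS alist).map Prod.fst)[t]'(by simp; omega) = (pvS alist)[t].1 := by simp
        have hF' : ((pvS alist).map Prod.fst)[t + 1]'(by simp; omega)
            = (pvS alist)[t + 1].1 := by simp
        have := pvCnt_sorted ((pvS alist).map Prod.fst) hpairF t (by simp; omega)
          (by rw [hF, hF']; exact hlt2)
        rw [hF] at this
        rw [this]
        simp [lenS]
      rw [show (alist.length : Int) - ((t : Int) + 1) + 1 = (alist.length : Int) - (t : Int)
        by ring]
      refine ih _ (by omega) (by simp only [List.length_set]; exact hlen) ?_
      have hval : (alist.length : Int) - (t : Int)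
          = 1 + pvCnt alist ((pvS alist)[t].1) := by
        rw [hcnt]; ring
      have := hsetOK _ hval
      intro p hp hpS
      exact this p hp hpS

-- ===== VERDICT (by name: the statement is the Claim_ definition above) =====
-- every list with the rank property is B's rank list
theorem pvRankExt (alist : List Int) (R : List Int) (hlen : R.length = alist.length)
    (hR : ∀ p : Nat, (hp : p < (pvS alist).length) →
      PySem.List.pyGetD R ((pvS alist)[p].2) 0 = 1 + pvCnt alist ((pvS alist)[p].1)) :
    R = alist.map (fun x => 1 + (alist.map (fun y => if y > x then (1 : Int) else 0)).sum) := by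
  have lenS := pvS_length alist
  apply List.ext_getElem (by simp [hlen])
  intro k hk hk2
  have hkn : k < alist.length := by omega
  have hkI : ((k : Nat) : Int) ∈ (pvS alist).map Prod.snd := by
    refine ((pvS_snd_perm alist).mem_iff).mpr ?_
    exact PySem.List.mem_pyRange_one.mpr ⟨by positivity, by exact_mod_cast hkn⟩
  rcases List.mem_iff_getElem.mp hkI with ⟨p, hpI, hIk⟩
  have hpS : p < (pvS alist).length := by simpa using hpI
  have hSk : (pvS alist)[p].2 = ((k : Nat) : Int) := by
    rw [← hIk]; simp
  have hmemp := pvS_mem alist _ (List.getElem_mem hpS)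
  have h1 := hR p hpS
  rw [hSk] at h1
  rw [PySem.List.pyGetD_eq_getElem _ _ (by positivity) (by exact_mod_cast hk)] at h1
  have hS1 : (pvS alist)[p].1 = alist[k] := by
    rw [hmemp.2.2, hSk]
    rw [PySem.List.pyGetD_eq_getElem _ _ (by positivity) (by exact_mod_cast hkn)]
    simp
  rw [hS1] at h1
  simp only [Int.toNat_natCast] at h1
  rw [List.getElem_map]
  exact h1

theorem insertonSort_spec : Claim_equal_insertonSort := by
  intro alist _hdom
  unfold Spec_insertonSort
  rcases Nat.eq_zero_or_pos alist.length with hz | hn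
  · have : alist = [] := List.eq_nil_of_length_eq_zero hz
    subst this
    rfl
  · have houter := pvOuter alist alist.length le_rfl
    rw [List.drop_length, PySem.List.pyRange_one_eq_nil (le_refl ((alist.length : Int)))]
      at houter
    simp only [List.append_nil] at houter
    have H0 : ∀ p : Nat, alist.length - 1 ≤ p → (hp : p < (pvS alist).length) →
        PySem.List.pyGetD ((PySem.List.pyRange 0 ((alist.length : Nat) : Int) 1).map
          (fun _ => (1 : Int))) ((pvS alist)[p].2) 0 = 1 + pvCnt alist ((pvS alist)[p].1) := by
      intro p hp hpS
      have lenS := pvS_length alist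
      have hpn : p = alist.length - 1 := by omega
      have hmemp := pvS_mem alist _ (List.getElem_mem hpS)
      have hget : PySem.List.pyGetD ((PySem.List.pyRange 0 ((alist.length : Nat) : Int) 1).map
          (fun _ => (1 : Int))) ((pvS alist)[p].2) 0 = 1 := by
        rw [PySem.List.pyGetD_eq_getElem _ _ (by omega)
          (by simp [PySem.List.length_pyRange_one]; omega)]
        simp
      rw [hget]
      have hpairF : ((pvS alist).map Prod.fst).Pairwise (· ≤ ·) :=
        List.pairwise_map.mpr (pvS_pairwise alist)
      have hcnt : pvCnt alist ((pvS alist)[p].1) = 0 := by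
        have hperm : pvCnt alist ((pvS alist)[p].1)
            = pvCnt ((pvS alist).map Prod.fst) ((pvS alist)[p].1) :=
          pvCnt_perm _ _ (pvS_fst_perm alist).symm _
        rw [hperm]
        have hlenF : ((pvS alist).map Prod.fst).length - 1 < ((pvS alist).map Prod.fst).length := by
          simp; omega
        have hfp : ((pvS alist).map Prod.fst)[((pvS alist).map Prod.fst).length - 1]'hlenF
            = (pvS alist)[p].1 := by
          simp only [List.getElem_map]
          congr 1
          simp [lenS, hpn]
        rw [← hfp]
        exact pvCnt_last _ hpairF _
      rw [hcnt]
      ring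
    have hrank := pvRankLoop alist (alist.length - 1)
      ((PySem.List.pyRange 0 ((alist.length : Nat) : Int) 1).map (fun _ => (1 : Int)))
      le_rfl hn (by simp [PySem.List.length_pyRange_one]) H0
    rw [show ((alist.length - 1 : Nat) : Int) = (alist.length : Int) - 1 by omega] at hrank
    rw [show (alist.length : Int) - ((alist.length : Int) - 1) = 1 by ring] at hrank
    simp only at hrank
    unfold insertonSort insertonSort_alt
    simp only []
    rw [houter]
    refine Prod.ext ?_ ?_
    · simp only []
      exact pvRankExt alist _ hrank.1 hrank.2
    · simp only []
      exact (pvIndexB alist).symm
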